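-- pv_equiv track=rewrite | github.com/Weiguo-Jiang/Kattis-Solutions | shuffling.py | outShuffle
-- ===== SOURCE A (Python) =====
-- def outShuffle(arr):
-- 	l = len(arr)
-- 	firstHalf = list()
-- 	secondHalf = list()
-- 	shuffled = list()
-- 	if l%2 == 0:
-- 		for i in range(l//2):
-- 			firstHalf.append(arr[i])
-- 		for i in range(l//2, l):
-- 			secondHalf.append(arr[i])
-- 		for i in range(l//2):
-- 			shuffled.append(firstHalf[i])
-- 			shuffled.append(secondHalf[i])
-- 	else:
-- 		for i in range(l//2+1):
-- 			firstHalf.append(arr[i])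
-- 		for i in range(l//2+1, l):
-- 			secondHalf.append(arr[i])
-- 		for i in range(l//2):
-- 			shuffled.append(firstHalf[i])
-- 			shuffled.append(secondHalf[i])
-- 		shuffled.append(firstHalf[-1])
-- 	return shuffled
-- ===== SOURCE B (Python) =====
-- def outShuffle(arr):
-- 	mid = (len(arr) + 1) // 2
-- 	res = [None] * len(arr)
-- 	res[0::2] = arr[:mid]
-- 	res[1::2] = arr[mid:]
-- 	return res
-- ===== Notes on version B (the rewrite author's own statement) =====
-- stated objective: idiomatic
-- what changed: Replaces A's even/odd branching with three index loops by a single split at mid=(n+1)//2 and two strided slice assignments into a preallocated result, with no interleaving loop.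
import Mathlib
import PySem

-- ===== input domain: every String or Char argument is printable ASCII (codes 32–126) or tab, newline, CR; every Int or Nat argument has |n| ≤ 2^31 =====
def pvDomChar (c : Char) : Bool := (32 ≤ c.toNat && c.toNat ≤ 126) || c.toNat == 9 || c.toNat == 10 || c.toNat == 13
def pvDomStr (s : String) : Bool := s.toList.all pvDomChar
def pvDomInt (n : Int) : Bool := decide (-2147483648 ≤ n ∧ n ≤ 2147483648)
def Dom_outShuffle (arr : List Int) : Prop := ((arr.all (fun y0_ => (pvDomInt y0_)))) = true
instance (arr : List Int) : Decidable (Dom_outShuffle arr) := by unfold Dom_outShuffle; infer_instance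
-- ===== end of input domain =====

-- B replaces A's even/odd branching with three index loops by one split at mid=(n+1)//2
-- and strided placement of the two halves into even/odd output slots (objective: idiomatic).

-- ===== PORT A =====
def outShuffle (arr : List Int) : List Int :=
  let l : Int := arr.length
  let firstHalf : List Int := []
  let secondHalf : List Int := []
  let shuffled : List Int := []
  if PySem.Int.mod l 2 = 0 then
    let firstHalf := (PySem.List.pyRange 0 (PySem.Int.floordiv l 2) 1).foldl
        (fun acc i => acc ++ [PySem.List.pyGetD arr i 0]) firstHalf
    let secondHalf := (PySem.List.pyRange (PySem.Int.floordiv l 2) l 1).foldl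
        (fun acc i => acc ++ [PySem.List.pyGetD arr i 0]) secondHalf
    let shuffled := (PySem.List.pyRange 0 (PySem.Int.floordiv l 2) 1).foldl
        (fun acc i => acc ++ [PySem.List.pyGetD firstHalf i 0, PySem.List.pyGetD secondHalf i 0]) shuffled
    shuffled
  else
    let firstHalf := (PySem.List.pyRange 0 (PySem.Int.floordiv l 2 + 1) 1).foldl
        (fun acc i => acc ++ [PySem.List.pyGetD arr i 0]) firstHalf
    let secondHalf := (PySem.List.pyRange (PySem.Int.floordiv l 2 + 1) l 1).foldl
        (fun acc i => acc ++ [PySem.List.pyGetD arr i 0]) secondHalf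
    let shuffled := (PySem.List.pyRange 0 (PySem.Int.floordiv l 2) 1).foldl
        (fun acc i => acc ++ [PySem.List.pyGetD firstHalf i 0, PySem.List.pyGetD secondHalf i 0]) shuffled
    shuffled ++ [PySem.List.pyGetD firstHalf (-1) 0]

-- ===== PORT B =====
-- weave models the two strided slice assignments res[0::2]=first, res[1::2]=second:
-- it places the heads of the two halves alternately (exact for |second| ≤ |first| ≤ |second|+1,
-- which the split mid=(n+1)//2 guarantees).
def weave (xs ys : List Int) : List Int :=
  match xs with
  | [] => ys
  | a :: as => a :: weave ys as
termination_by xs.length + ys.length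
decreasing_by simp; omega

def outShuffle_alt (arr : List Int) : List Int :=
  let mid : Int := PySem.Int.floordiv ((arr.length : Int) + 1) 2
  weave (PySem.List.slice arr none (some mid)) (PySem.List.slice arr (some mid) none)

-- ===== PRECONDITION & SPEC =====
def Spec_outShuffle (arr : List Int) (out : List Int) : Prop := out = outShuffle_alt arr
instance (arr : List Int) (out : List Int) : Decidable (Spec_outShuffle arr out) := by unfold Spec_outShuffle; infer_instance

-- ===== CLAIM (what is proved, stated in full; the proofs are below) =====
def Claim_equal_outShuffle : Prop := ∀ (arr : List Int), Dom_outShuffle arr → Spec_outShuffle arr (outShuffle arr)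

-- ===== LEMMAS AND PROOFS =====

lemma weave_nil (ys : List Int) : weave [] ys = ys := by simp [weave]

lemma weave_cons (a : Int) (as ys : List Int) : weave (a :: as) ys = a :: weave ys as := by
  rw [weave]

lemma map_range_getD (m : Nat) (xs : List Int) (h : m ≤ xs.length) :
    (List.range m).map (fun k => xs.getD k 0) = xs.take m := by
  apply List.ext_getElem <;> simp [List.getD_eq_getElem?_getD, *]
  intro i h1 h2
  simp [List.getElem?_eq_getElem (by omega : i < xs.length)]

lemma weave_even : ∀ (s f : List Int), f.length = s.length →
    (List.range s.length).flatMap (fun k => [f.getD k 0, s.getD k 0]) = weave f s := by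
  intro s
  induction s with
  | nil =>
    intro f h
    have hf : f = [] := List.eq_nil_of_length_eq_zero (by simpa using h)
    subst hf; simp [weave_nil]
  | cons b bs ih =>
    intro f h
    match f with
    | a :: as =>
      simp only [List.length_cons, List.range_succ_eq_map, List.flatMap_cons, List.flatMap_map,
        List.getD_cons_zero, List.getD_cons_succ, List.cons_append, List.nil_append]
      rw [weave_cons, weave_cons, ← ih as (by simpa using h)]

lemma weave_odd : ∀ (s f : List Int), f.length = s.length + 1 →
    (List.range s.length).flatMap (fun k => [f.getD k 0, s.getD k 0]) ++ [f.getD s.length 0]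
      = weave f s := by
  intro s
  induction s with
  | nil =>
    intro f h
    match f with
    | [a] => simp [weave]
  | cons b bs ih =>
    intro f h
    match f with
    | a :: as =>
      simp only [List.length_cons, List.range_succ_eq_map, List.flatMap_cons, List.flatMap_map,
        List.getD_cons_zero, List.getD_cons_succ, List.cons_append, List.nil_append]
      rw [weave_cons, weave_cons, ← ih as (by simpa using h)]

lemma loop_take (arr : List Int) (m : Nat) (h : m ≤ arr.length) :
    (PySem.List.pyRange 0 (m : Int) 1).foldl
      (fun acc i => acc ++ [PySem.List.pyGetD arr i 0]) [] = arr.take m := by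
  rw [PySem.List.foldl_append_singleton_eq_map]
  rw [show PySem.List.pyRange 0 (m : Int) 1 = (List.range m).map Nat.cast from by
    simpa using PySem.List.pyRange_zero_natCast m]
  rw [List.map_map]
  simpa [Function.comp_def] using map_range_getD m arr h

lemma loop_drop (arr : List Int) (m : Nat) :
    (PySem.List.pyRange (m : Int) (arr.length : Int) 1).foldl
      (fun acc i => acc ++ [PySem.List.pyGetD arr i 0]) [] = arr.drop m := by
  have := PySem.List.foldl_pyRange_pyGetD' arr 0 (fun acc v => acc ++ [v]) ([] : List Int)
    (a := (m : Int)) (by positivity)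
  simp only [Int.toNat_natCast] at this
  rw [this, PySem.List.foldl_append_singleton]
  simp

lemma loop_flat (F S : List Int) (m : Nat) :
    (PySem.List.pyRange 0 (m : Int) 1).foldl
      (fun acc i => acc ++ [PySem.List.pyGetD F i 0, PySem.List.pyGetD S i 0]) []
      = (List.range m).flatMap (fun k => [F.getD k 0, S.getD k 0]) := by
  rw [PySem.List.foldl_append_eq_flatMap]
  rw [show PySem.List.pyRange 0 (m : Int) 1 = (List.range m).map Nat.cast from by
    simpa using PySem.List.pyRange_zero_natCast m]
  rw [List.flatMap_map]
  simp

-- ===== VERDICT (by name: the statement is the Claim_ definition above) =====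
theorem outShuffle_spec : Claim_equal_outShuffle := by
  intro arr _
  unfold Spec_outShuffle outShuffle outShuffle_alt
  have hfd : PySem.Int.floordiv ((arr.length : Int)) 2 = ((arr.length / 2 : Nat) : Int) := by
    exact_mod_cast PySem.Int.floordiv_natCast arr.length 2
  have hmid : PySem.Int.floordiv ((arr.length : Int) + 1) 2 = (((arr.length + 1) / 2 : Nat) : Int) := by
    have h := PySem.Int.floordiv_natCast (arr.length + 1) 2
    push_cast at h ⊢; exact_mod_cast h
  have hpariff : (PySem.Int.mod ((arr.length : Int)) 2 = 0) ↔ 2 ∣ arr.length := by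
    rw [PySem.Int.mod_eq_zero_iff_dvd]; exact_mod_cast Int.natCast_dvd_natCast (m := 2)
  simp only [hfd, hmid]
  by_cases hpar : 2 ∣ arr.length
  · rw [if_pos (hpariff.mpr hpar)]
    set n := arr.length with hn
    set m := n / 2 with hm
    have hmn : m ≤ n := Nat.div_le_self _ _
    rw [loop_take arr m hmn, loop_drop arr m, loop_flat]
    have hSlen : (arr.drop m).length = m := by simp [← hn]; omega
    have hFlen : (arr.take m).length = m := by simp [← hn]; omega
    have hw := weave_even (arr.drop m) (arr.take m) (by rw [hFlen, hSlen])
    rw [hSlen] at hw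
    rw [hw]
    have hmid2 : (n + 1) / 2 = m := by omega
    rw [PySem.List.slice_to_natCast, PySem.List.slice_from_natCast, hmid2]
  · rw [if_neg (fun hc => hpar (hpariff.mp hc))]
    set n := arr.length with hn
    set m := n / 2 with hm
    have hodd : n = 2 * m + 1 := by omega
    have hcast : ((m : Int) + 1) = ((m + 1 : Nat) : Int) := by push_cast; ring
    rw [hcast, loop_take arr (m + 1) (by omega), loop_drop arr (m + 1), loop_flat]
    have hSlen : (arr.drop (m + 1)).length = m := by simp [← hn]; omega
    have hFlen : (arr.take (m + 1)).length = m + 1 := by simp [← hn]; omega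
    have hFne : arr.take (m + 1) ≠ [] := by
      intro hc; rw [hc] at hFlen; simp at hFlen
    rw [PySem.List.pyGetD_neg_one _ _ hFne]
    have hlast : (arr.take (m + 1)).getLast hFne = (arr.take (m + 1)).getD m 0 := by
      rw [List.getLast_eq_getElem, List.getD_eq_getElem _ _ (by omega)]
      simp [hFlen]
    have hw := weave_odd (arr.drop (m + 1)) (arr.take (m + 1)) (by rw [hFlen, hSlen])
    rw [hSlen] at hw
    rw [hlast, hw]
    have hmid2 : (n + 1) / 2 = m + 1 := by omega
    rw [PySem.List.slice_to_natCast, PySem.List.slice_from_natCast, hmid2]
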